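-- pv_equiv track=rewrite | github.com/admins97/MSC_PRVR | src/Validations/validations.py | get_gt_act
-- ===== SOURCE A (Python) =====
-- def get_gt_act(video_metas, query_metas):
--     v2t_gt = []
--     for vid_id in video_metas:
--         v2t_gt.append([])
--         for i, query_id in enumerate(query_metas):
--             if query_id.split('#', 1)[0][2:] == vid_id:
--
--                 v2t_gt[-1].append(i)
--     t2v_gt = {}
--     for i, t_gts in enumerate(v2t_gt):
--         for t_gt in t_gts:
--             t2v_gt.setdefault(t_gt, [])
--             t2v_gt[t_gt].append(i)
--
--     return v2t_gt, t2v_gt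
-- ===== SOURCE B (Python) =====
-- def get_gt_act(video_metas, query_metas):
--     # Index each video key once; one pass over the queries then scatters each query
--     # index into v2t_gt via that table (no nested scan) and records its match list;
--     # t2v_gt maps each matched query (first-seen order over v2t_gt) to its matches.
--     vid_index = {}
--     for vi, vid_id in enumerate(video_metas):
--         vid_index.setdefault(vid_id, []).append(vi)
--     v2t_gt = [[] for _ in video_metas]
--     matches = []
--     for qi, query_id in enumerate(query_metas):
--         vis = vid_index.get(query_id.split('#', 1)[0][2:], [])
--         matches.append(vis)
--         for vi in vis:
--             v2t_gt[vi].append(qi)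
--     t2v_gt = {qi: matches[qi] for qi in dict.fromkeys(q for qs in v2t_gt for q in qs)}
--     return v2t_gt, t2v_gt
-- ===== Notes on version B (the rewrite author's own statement) =====
-- stated objective: faster
-- what changed: A's nested scan of all queries per video plus a separate dict-inversion pass is replaced by a hash index from video id to its indices, built once, a single scattering pass over the queries that fills v2t_gt via table lookups, and a direct rebuild of t2v_gt from the per-query match lists in first-seen order.
import Mathlib
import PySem

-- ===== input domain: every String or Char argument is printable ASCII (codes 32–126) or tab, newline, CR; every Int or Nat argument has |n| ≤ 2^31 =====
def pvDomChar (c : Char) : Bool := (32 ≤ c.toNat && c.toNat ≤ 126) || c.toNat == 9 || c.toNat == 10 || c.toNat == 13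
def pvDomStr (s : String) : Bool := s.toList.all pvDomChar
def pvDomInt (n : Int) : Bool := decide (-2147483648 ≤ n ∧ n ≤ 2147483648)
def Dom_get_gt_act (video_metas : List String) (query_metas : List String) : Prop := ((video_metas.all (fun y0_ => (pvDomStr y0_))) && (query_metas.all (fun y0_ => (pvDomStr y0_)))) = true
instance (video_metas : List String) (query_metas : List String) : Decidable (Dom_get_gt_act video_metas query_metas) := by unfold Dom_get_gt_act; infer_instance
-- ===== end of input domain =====

-- B replaces A's nested video×query scan and separate dict-inversion pass by a
-- video-key index table, one scattering pass over the queries, and a direct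
-- first-seen-order rebuild of t2v_gt; same return value (proved below).

-- Shared helper: the key expression query_id.split('#', 1)[0][2:] of both Pythons,
-- as a List Char. split with the nonempty separator '#' always returns a nonempty
-- list, so the Python [0] (which would raise only on an empty list) is headD [].
def pvKey (q : String) : List Char :=
  PySem.List.slice ((PySem.Chars.splitOnMax q.toList ['#'] 1).headD []) (some 2) none

-- ===== PORT A =====
-- Python string equality 'key == vid_id' is ported as List Char equality on .toList.
def get_gt_act (video_metas : List String) (query_metas : List String) : List (List Int) × (List (Int × List Int)) :=
  let v2t_gt := video_metas.foldl (fun acc vid_id =>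
    (PySem.List.enumerate query_metas).foldl (fun a p =>
      if pvKey p.2 == vid_id.toList then
        -- v2t_gt[-1].append(i)
        PySem.List.pySetD a (-1) (PySem.List.pyGetD a (-1) [] ++ [p.1])
      else a) (acc ++ [[]])) []
  let t2v_gt := (PySem.List.enumerate v2t_gt).foldl (fun d p =>
    -- t2v_gt.setdefault(t_gt, []); t2v_gt[t_gt].append(i)
    p.2.foldl (fun d t_gt => d.modify t_gt [] (· ++ [p.1])) d)
    (PySem.Dict.empty : PySem.Dict Int (List Int))
  (v2t_gt, t2v_gt.items)

-- ===== PORT B =====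
def get_gt_act_alt (video_metas : List String) (query_metas : List String) : List (List Int) × (List (Int × List Int)) :=
  -- vid_index.setdefault(vid_id, []).append(vi)
  let vid_index := (PySem.List.enumerate video_metas).foldl
    (fun d p => d.modify p.2.toList [] (· ++ [p.1]))
    (PySem.Dict.empty : PySem.Dict (List Char) (List Int))
  -- one pass over the queries: state = (v2t_gt, matches)
  let st := (PySem.List.enumerate query_metas).foldl
    (fun (st : List (List Int) × List (List Int)) p =>
      let vis := vid_index.getD (pvKey p.2) []
      (vis.foldl (fun a vi => PySem.List.pySetD a vi (PySem.List.pyGetD a vi [] ++ [p.1])) st.1,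
       st.2 ++ [vis]))
    (video_metas.map (fun _ => ([] : List Int)), [])
  -- {qi: matches[qi] for qi in dict.fromkeys(q for qs in v2t_gt for q in qs)}:
  -- dict.fromkeys over the flattened rows is PySem.List.dedup, so the
  -- comprehension's keys are already distinct and the built dict is this
  -- association list itself; matches[qi] is pyGetD (qi occurring in v2t_gt is
  -- always a valid index into matches).
  let t2v_gt := (PySem.List.dedup st.1.flatten).map
    (fun qi => (qi, PySem.List.pyGetD st.2 qi []))
  (st.1, t2v_gt)

-- ===== PRECONDITION & SPEC =====
def Spec_get_gt_act (video_metas : List String) (query_metas : List String) (out : List (List Int) × (List (Int × List Int))) : Prop := out = get_gt_act_alt video_metas query_metas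
instance (video_metas : List String) (query_metas : List String) (out : List (List Int) × (List (Int × List Int))) : Decidable (Spec_get_gt_act video_metas query_metas out) := by unfold Spec_get_gt_act; infer_instance

-- ===== CLAIM (what is proved, stated in full; the proofs are below) =====
def Claim_equal_get_gt_act : Prop := ∀ (video_metas : List String) (query_metas : List String), Dom_get_gt_act video_metas query_metas → Spec_get_gt_act video_metas query_metas (get_gt_act video_metas query_metas)

-- ===== LEMMAS AND PROOFS =====

-- The row A builds for one video id: the matching query indices, in order.
def gRow (qs : List String) (vid : String) : List Int :=
  ((PySem.List.enumerate qs).filter (fun p => pvKey p.2 == vid.toList)).map (·.1)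

-- The list B's index table holds for one key: the matching video indices, in order.
def mVids (vids : List String) (c : List Char) : List Int :=
  ((PySem.List.enumerate vids).filter (fun p => p.2.toList == c)).map (·.1)

-- the (query index, video index) pair stream A's inversion loop processes
def pvS (rows : List (List Int)) : List (Int × Int) :=
  (PySem.List.enumerate rows).flatMap (fun p => p.2.map (fun t => (t, p.1)))

theorem pySetD_append_singleton_neg_one {α : Type} (acc : List α) (row v : α) :
    PySem.List.pySetD (acc ++ [row]) (-1) v = acc ++ [v] := by
  simp [PySem.List.pySetD, PySem.List.pySet?, PySem.List.pyIdx?]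

-- A's inner loop: append the matching indices to the last row
theorem innerA_eq {α : Type} (c : (Int × α) → Bool) (l : List (Int × α))
    (acc : List (List Int)) (row : List Int) :
    l.foldl (fun a p =>
      if c p then PySem.List.pySetD a (-1) (PySem.List.pyGetD a (-1) [] ++ [p.1]) else a)
      (acc ++ [row])
    = acc ++ [row ++ (l.filter c).map (·.1)] := by
  induction l generalizing row with
  | nil => simp
  | cons hd tl ih =>
    by_cases h : c hd
    · simp only [List.foldl_cons, h, if_pos,
        PySem.List.pyGetD_neg_one_append_singleton, pySetD_append_singleton_neg_one]
      rw [ih]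
      simp [h]
    · simp only [List.foldl_cons, h, if_neg, Bool.false_eq_true, not_false_iff]
      rw [ih]
      simp [h]

-- A's v2t_gt is one row per video
theorem A_v2t_eq (vids qs : List String) :
    vids.foldl (fun acc vid_id =>
      (PySem.List.enumerate qs).foldl (fun a p =>
        if pvKey p.2 == vid_id.toList then
          PySem.List.pySetD a (-1) (PySem.List.pyGetD a (-1) [] ++ [p.1])
        else a) (acc ++ [[]])) []
    = vids.map (gRow qs) := by
  have h := PySem.List.foldl_congr_mem
    (l := vids) (init := ([] : List (List Int)))
    (f := fun acc vid_id =>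
      (PySem.List.enumerate qs).foldl (fun a p =>
        if pvKey p.2 == vid_id.toList then
          PySem.List.pySetD a (-1) (PySem.List.pyGetD a (-1) [] ++ [p.1])
        else a) (acc ++ [[]]))
    (g := fun acc vid_id => acc ++ [gRow qs vid_id])
    (by intro acc vid _ ; beta_reduce ; rw [innerA_eq] ; simp [gRow])
  rw [h, PySem.List.foldl_append_singleton_eq_map]
  simp

-- B's index table holds exactly the matching video indices
theorem vid_index_getD (vids : List String) (c : List Char) :
    (((PySem.List.enumerate vids).foldl
      (fun d p => d.modify p.2.toList [] (· ++ [p.1]))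
      (PySem.Dict.empty : PySem.Dict (List Char) (List Int))).getD c [])
    = mVids vids c := by
  have h : (PySem.List.enumerate vids).foldl
      (fun d p => d.modify p.2.toList [] (· ++ [p.1]))
      (PySem.Dict.empty : PySem.Dict (List Char) (List Int))
      = ((PySem.List.enumerate vids).map (fun p => (p.2.toList, p.1))).foldl
        (fun d r => d.modify r.1 [] (· ++ [r.2])) PySem.Dict.empty := by
    rw [List.foldl_map]
  rw [h, PySem.Dict.getD_foldl_modify_append]
  simp [mVids, List.filter_map, List.map_map, Function.comp_def]

theorem mVids_mem_shape (vids : List String) (c : List Char) :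
    ∀ v ∈ mVids vids c, ∃ k : Nat, v = (k : Int) ∧ k < vids.length := by
  intro v hv
  simp only [mVids, List.mem_map, List.mem_filter] at hv
  obtain ⟨p, ⟨hp, _⟩, rfl⟩ := hv
  rw [PySem.List.mem_enumerate_iff] at hp
  obtain ⟨k, hk, rfl⟩ := hp
  exact ⟨k, by simp, hk⟩

theorem mVids_nodup (vids : List String) (c : List Char) : (mVids vids c).Nodup := by
  have h1 := PySem.List.pairwise_lt_enumerate vids 0
  have h2 := h1.filter (fun p => p.2.toList == c)
  have h3 := h2.map (f := fun p : Int × String => p.1) (S := fun a b => a < b) (by intro a b h; exact h)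
  exact List.Pairwise.imp (by intro a b h; exact ne_of_lt h) h3

theorem mem_mVids_iff (vids : List String) (c : List Char) (j : Nat) (hj : j < vids.length) :
    ((j : Int) ∈ mVids vids c) ↔ (vids[j].toList == c) = true := by
  simp only [mVids, List.mem_map, List.mem_filter]
  constructor
  · rintro ⟨p, ⟨hp, hc⟩, hfst⟩
    rw [PySem.List.mem_enumerate_iff] at hp
    obtain ⟨k, hk, rfl⟩ := hp
    simp at hfst
    subst hfst
    exact hc
  · intro h
    refine ⟨((j:Int), vids[j]), ⟨?_, h⟩, rfl⟩
    rw [PySem.List.mem_enumerate_iff]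
    exact ⟨j, hj, by simp⟩

theorem gRow_nodup (qs : List String) (vid : String) : (gRow qs vid).Nodup := by
  have h1 := PySem.List.pairwise_lt_enumerate qs 0
  have h2 := h1.filter (fun p => pvKey p.2 == vid.toList)
  have h3 := h2.map (f := fun p : Int × String => p.1) (S := fun a b => a < b) (by intro a b h; exact h)
  exact List.Pairwise.imp (by intro a b h; exact ne_of_lt h) h3

theorem mem_gRow_iff (qs : List String) (vid : String) (j : Nat) (hj : j < qs.length) :
    ((j : Int) ∈ gRow qs vid) ↔ (pvKey qs[j] == vid.toList) = true := by
  simp only [gRow, List.mem_map, List.mem_filter]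
  constructor
  · rintro ⟨p, ⟨hp, hc⟩, hfst⟩
    rw [PySem.List.mem_enumerate_iff] at hp
    obtain ⟨k, hk, rfl⟩ := hp
    simp at hfst
    subst hfst
    exact hc
  · intro h
    refine ⟨((j:Int), qs[j]), ⟨?_, h⟩, rfl⟩
    rw [PySem.List.mem_enumerate_iff]
    exact ⟨j, hj, by simp⟩

-- one scatter step: append x at each (distinct, in-range) position of M
theorem scat1 (M : List Int) (x : Int) (st : List (List Int)) (hnd : M.Nodup)
    (hin : ∀ v ∈ M, ∃ k : Nat, v = (k : Int) ∧ k < st.length) :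
    (M.foldl (fun a vi => PySem.List.pySetD a vi (PySem.List.pyGetD a vi [] ++ [x])) st).length = st.length ∧
    ∀ j : Nat, (hj : j < st.length) →
      (M.foldl (fun a vi => PySem.List.pySetD a vi (PySem.List.pyGetD a vi [] ++ [x])) st)[j]?
        = some (st[j] ++ if (j : Int) ∈ M then [x] else []) := by
  induction M generalizing st with
  | nil => simp
  | cons v M' ih =>
    obtain ⟨k, rfl, hk⟩ := hin (v := v) (by simp)
    simp only [List.foldl_cons]
    have hset : PySem.List.pySetD st (k : Int) (PySem.List.pyGetD st (k : Int) [] ++ [x])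
        = st.set k (st[k] ++ [x]) := by
      simp [PySem.List.pySetD_natCast, PySem.List.pyGetD_natCast, List.getD_eq_getElem?_getD,
        List.getElem?_eq_getElem hk]
    rw [hset]
    have hnd' : M'.Nodup := hnd.of_cons
    have hknotin : (k : Int) ∉ M' := (List.nodup_cons.mp hnd).1
    obtain ⟨ihlen, ihget⟩ := ih (st := st.set k (st[k] ++ [x])) hnd'
      (by intro v hv; obtain ⟨k', h1, h2⟩ := hin v (by simp [hv]); exact ⟨k', h1, by simpa using h2⟩)
    refine ⟨by simp at ihlen ⊢; omega, ?_⟩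
    intro j hj
    rw [ihget j (by simpa using hj)]
    by_cases hjk : j = k
    · subst hjk
      have hmem : ((j:Int) ∈ (j:Int) :: M') := by simp
      simp [hmem, hknotin, List.getElem_set_self]
    · have h1 : (st.set k (st[k] ++ [x]))[j]'(by simpa using hj) = st[j] := by
        rw [List.getElem_set_ne (by omega)]
      rw [h1]
      have hiff : ((j : Int) ∈ (k:Int) :: M') ↔ ((j:Int) ∈ M') := by
        simp only [List.mem_cons]
        constructor
        · rintro (h | h)
          · exfalso; exact hjk (by exact_mod_cast h)
          · exact h
        · exact Or.inr
      simp only [hiff]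

-- B's query loop, first component: scattering = per-row filtering
theorem loopB_v2t (vids : List String) (l : List (Int × String)) (st : List (List Int))
    (hst : st.length = vids.length) :
    (l.foldl (fun a p =>
        (mVids vids (pvKey p.2)).foldl
          (fun a2 vi => PySem.List.pySetD a2 vi (PySem.List.pyGetD a2 vi [] ++ [p.1])) a) st).length = st.length ∧
    ∀ j : Nat, (hj : j < vids.length) →
      (l.foldl (fun a p =>
        (mVids vids (pvKey p.2)).foldl
          (fun a2 vi => PySem.List.pySetD a2 vi (PySem.List.pyGetD a2 vi [] ++ [p.1])) a) st)[j]?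
      = some ((st[j]?.getD []) ++ (l.filter (fun p => pvKey p.2 == vids[j].toList)).map (·.1)) := by
  induction l generalizing st with
  | nil =>
    refine ⟨rfl, ?_⟩
    intro j hj
    simp [List.getElem?_eq_getElem (by omega : j < st.length)]
  | cons hd tl ih =>
    simp only [List.foldl_cons]
    obtain ⟨slen, sget⟩ := scat1 (mVids vids (pvKey hd.2)) hd.1 st
      (mVids_nodup vids _)
      (by intro v hv; obtain ⟨k, h1, h2⟩ := mVids_mem_shape vids _ v hv; exact ⟨k, h1, by omega⟩)
    set st1 := (mVids vids (pvKey hd.2)).foldl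
      (fun a vi => PySem.List.pySetD a vi (PySem.List.pyGetD a vi [] ++ [hd.1])) st with hst1
    obtain ⟨ilen, iget⟩ := ih (st := st1) (by omega)
    refine ⟨by omega, ?_⟩
    intro j hj
    rw [iget j hj]
    have hjst : j < st.length := by omega
    have h1 : st1[j]?.getD [] = st[j] ++ if ((j:Int) ∈ mVids vids (pvKey hd.2)) then [hd.1] else [] := by
      rw [sget j hjst]; rfl
    rw [h1]
    have hmem : ((j:Int) ∈ mVids vids (pvKey hd.2)) ↔ (pvKey hd.2 == vids[j].toList) = true := by
      rw [mem_mVids_iff vids _ j (by omega)]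
      simp only [beq_iff_eq]; exact eq_comm
    rw [List.filter_cons]
    rw [List.getElem?_eq_getElem hjst]
    by_cases hb : (pvKey hd.2 == vids[j].toList) = true
    · have hm : ((j:Int) ∈ mVids vids (pvKey hd.2)) := hmem.mpr hb
      rw [if_pos hm, if_pos hb]
      simp
    · have hm : ¬ ((j:Int) ∈ mVids vids (pvKey hd.2)) := fun h => hb (hmem.mp h)
      rw [if_neg hm, if_neg hb]
      simp

-- B's v2t_gt equals A's
theorem B_v2t_eq (vids qs : List String) :
    (PySem.List.enumerate qs).foldl (fun a p =>
        (mVids vids (pvKey p.2)).foldl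
          (fun a2 vi => PySem.List.pySetD a2 vi (PySem.List.pyGetD a2 vi [] ++ [p.1])) a)
      (vids.map (fun _ => ([] : List Int)))
    = vids.map (gRow qs) := by
  obtain ⟨hlen, hget⟩ := loopB_v2t vids (PySem.List.enumerate qs)
    (vids.map (fun _ => ([] : List Int))) (by simp)
  apply List.ext_getElem?
  intro j
  by_cases hj : j < vids.length
  · rw [hget j hj]
    simp [gRow, List.getElem?_eq_getElem (by simp [hj] : j < (vids.map (gRow qs)).length)]
  · have hnone : ∀ (L : List (List Int)), L.length = vids.length → L[j]? = none := by
      intro L hL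
      exact List.getElem?_eq_none (by omega)
    rw [hnone _ (by rw [hlen]; simp), hnone _ (by simp)]

-- A's nested inversion loop is the fold over the flattened pair stream
theorem A_t2v_eq_foldS (rows : List (List Int)) :
    (PySem.List.enumerate rows).foldl (fun d p =>
      p.2.foldl (fun d t_gt => d.modify t_gt [] (· ++ [p.1])) d)
      (PySem.Dict.empty : PySem.Dict Int (List Int))
    = (pvS rows).foldl (fun d r => d.modify r.1 [] (· ++ [r.2])) PySem.Dict.empty := by
  rw [pvS, List.foldl_flatMap]
  congr 1
  funext d p
  rw [List.foldl_map]

theorem pvS_map_fst (rows : List (List Int)) : (pvS rows).map (·.1) = rows.flatten := by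
  rw [pvS, List.map_flatMap]
  have h : ∀ p : Int × List Int, ((p.2.map (fun t => (t, p.1))).map (·.1)) = p.2 := by
    intro p; simp [Function.comp_def]
  calc (PySem.List.enumerate rows).flatMap (fun p => (p.2.map (fun t => (t, p.1))).map (·.1))
      = (PySem.List.enumerate rows).flatMap (fun p => p.2) := by
        apply List.flatMap_congr; intro p _; exact h p
    _ = rows.flatten := by
        rw [List.flatMap_def, PySem.List.map_snd_enumerate]

theorem enumerate_map {α β : Type} (f : α → β) (l : List α) (s : Int) :
    PySem.List.enumerate (l.map f) s = (PySem.List.enumerate l s).map (fun p => (p.1, f p.2)) := by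
  induction l generalizing s with
  | nil => simp [PySem.List.enumerate_nil]
  | cons hd tl ih => simp [PySem.List.enumerate_cons, ih]

theorem map_filter_eq_flatMap {α β : Type} (g : α → Bool) (f : α → β) (l : List α) :
    (l.filter g).map f = l.flatMap (fun x => if g x then [f x] else []) := by
  induction l with
  | nil => simp
  | cons hd tl ih =>
    rw [List.filter_cons]
    by_cases h : g hd
    · simp [h, ih]
    · simp [h, ih]

-- the value A accumulates for a matched query index is B's match list
theorem A_val_eq (vids qs : List String) (qi : Nat) (hqi : qi < qs.length) :
    ((pvS (vids.map (gRow qs))).filter (fun r => r.1 == (qi : Int))).map (·.2)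
    = mVids vids (pvKey qs[qi]) := by
  rw [pvS, List.filter_flatMap, List.map_flatMap, enumerate_map]
  rw [List.flatMap_map]
  have step : ∀ p : Int × String,
      ((((gRow qs p.2).map (fun t => (t, p.1))).filter (fun r => r.1 == (qi:Int))).map (·.2))
      = if (pvKey qs[qi] == p.2.toList) = true then [p.1] else [] := by
    intro p
    rw [List.filter_map]
    have hcomp : ((fun r : Int × Int => r.1 == (qi:Int)) ∘ (fun t => (t, p.1))) = (fun t => t == (qi:Int)) := rfl
    rw [hcomp, List.map_map]
    have hrep : (gRow qs p.2).filter (fun t => t == (qi:Int)) = List.replicate ((gRow qs p.2).count (qi:Int)) (qi:Int) :=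
      List.filter_beq _
    rw [hrep]
    have hc2 : ((fun x : Int × Int => x.2) ∘ (fun t : Int => (t, p.1))) = (fun _ => p.1) := rfl
    rw [hc2, List.map_replicate]
    by_cases hm : ((qi:Int) ∈ gRow qs p.2)
    · rw [List.count_eq_one_of_mem (gRow_nodup qs p.2) hm]
      rw [if_pos ((mem_gRow_iff qs p.2 qi hqi).mp hm)]
      rfl
    · rw [List.count_eq_zero_of_not_mem hm]
      rw [if_neg (fun h => hm ((mem_gRow_iff qs p.2 qi hqi).mpr h))]
      rfl
  calc (PySem.List.enumerate vids).flatMap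
        (fun p => ((((gRow qs p.2).map (fun t => (t, p.1))).filter (fun r => r.1 == (qi:Int))).map (·.2)))
      = (PySem.List.enumerate vids).flatMap
        (fun p => if (p.2.toList == pvKey qs[qi]) = true then [p.1] else []) := by
        apply List.flatMap_congr
        intro p _
        rw [step p]
        have hiff : ((pvKey qs[qi] == p.2.toList) = true) ↔ ((p.2.toList == pvKey qs[qi]) = true) := by
          simp only [beq_iff_eq]; exact eq_comm
        by_cases h : (p.2.toList == pvKey qs[qi]) = true
        · rw [if_pos (hiff.mpr h), if_pos h]
        · rw [if_neg (fun hh => h (hiff.mp hh)), if_neg h]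
    _ = mVids vids (pvKey qs[qi]) := by
        rw [mVids, map_filter_eq_flatMap]

-- every key of A's dict is a valid query index
theorem keys_shape (vids qs : List String) :
    ∀ c ∈ PySem.Set.ofList (vids.map (gRow qs)).flatten,
      ∃ qi : Nat, c = (qi : Int) ∧ qi < qs.length := by
  intro c hc
  rw [PySem.Set.mem_ofList] at hc
  rw [List.mem_flatten] at hc
  obtain ⟨row, hrow, hcrow⟩ := hc
  rw [List.mem_map] at hrow
  obtain ⟨vid, _, rfl⟩ := hrow
  simp only [gRow, List.mem_map, List.mem_filter] at hcrow
  obtain ⟨p, ⟨hp, _⟩, rfl⟩ := hcrow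
  rw [PySem.List.mem_enumerate_iff] at hp
  obtain ⟨k, hk, rfl⟩ := hp
  exact ⟨k, by simp, hk⟩

-- A's association list equals B's (first-seen keys over the rows, table values)
theorem A_items_eq (vids qs : List String) :
    ((PySem.List.enumerate (vids.map (gRow qs))).foldl (fun d p =>
      p.2.foldl (fun d t_gt => d.modify t_gt [] (· ++ [p.1])) d)
      (PySem.Dict.empty : PySem.Dict Int (List Int))).items
    = (PySem.List.dedup (vids.map (gRow qs)).flatten).map
        (fun qi => (qi, PySem.List.pyGetD ((PySem.List.enumerate qs).map (fun p => mVids vids (pvKey p.2))) qi [])) := by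
  rw [A_t2v_eq_foldS]
  have hkeys : ((pvS (vids.map (gRow qs))).foldl (fun d r => d.modify r.1 [] (· ++ [r.2]))
      (PySem.Dict.empty : PySem.Dict Int (List Int))).keys
      = PySem.Set.ofList ((vids.map (gRow qs)).flatten) := by
    rw [PySem.Dict.keys_foldl_modify_key (key := fun r : Int × Int => r.1) (d0 := [])
      (f := fun d r => (· ++ [r.2]))]
    rw [← pvS_map_fst]
    rfl
  have hnd : ((pvS (vids.map (gRow qs))).foldl (fun d r => d.modify r.1 [] (· ++ [r.2]))
      (PySem.Dict.empty : PySem.Dict Int (List Int))).keys.Nodup := by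
    rw [hkeys]; exact PySem.Set.nodup_ofList _
  rw [PySem.Dict.items_eq_map_keys _ hnd []]
  rw [hkeys, PySem.List.dedup_eq_ofList]
  apply List.map_congr_left
  intro c hc
  obtain ⟨qi, rfl, hqi⟩ := keys_shape vids qs c hc
  have hval : ((pvS (vids.map (gRow qs))).foldl (fun d r => d.modify r.1 [] (· ++ [r.2]))
      (PySem.Dict.empty : PySem.Dict Int (List Int))).getD (qi:Int) []
      = mVids vids (pvKey qs[qi]) := by
    rw [PySem.Dict.getD_foldl_modify_append]
    have hemp : (PySem.Dict.empty : PySem.Dict Int (List Int)).getD (qi:Int) [] = [] := rfl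
    rw [hemp, ← A_val_eq vids qs qi hqi]
    simp
  rw [hval]
  have hlen : qi < ((PySem.List.enumerate qs).map (fun p => mVids vids (pvKey p.2))).length := by
    simp [PySem.List.length_enumerate, hqi]
  rw [PySem.List.pyGetD_natCast, List.getD_eq_getElem?_getD, List.getElem?_eq_getElem hlen]
  simp only [List.getElem_map, PySem.List.getElem_enumerate]
  simp

-- B's matches list
theorem B_matches_eq (vids qs : List String) :
    (PySem.List.enumerate qs).foldl (fun acc p => acc ++ [mVids vids (pvKey p.2)]) []
    = (PySem.List.enumerate qs).map (fun p => mVids vids (pvKey p.2)) := by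
  rw [PySem.List.foldl_append_singleton_eq_map]
  simp

-- ===== VERDICT (by name: the statement is the Claim_ definition above) =====
theorem get_gt_act_spec : Claim_equal_get_gt_act := by
  intro vids qs _
  unfold Spec_get_gt_act
  simp only [get_gt_act, get_gt_act_alt]
  rw [A_v2t_eq vids qs, A_items_eq]
  simp only [vid_index_getD]
  rw [PySem.List.foldl_prod_mk
    (f := fun a (p : Int × String) => (mVids vids (pvKey p.2)).foldl
      (fun a2 vi => PySem.List.pySetD a2 vi (PySem.List.pyGetD a2 vi [] ++ [p.1])) a)
    (g := fun (m : List (List Int)) (p : Int × String) => m ++ [mVids vids (pvKey p.2)])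
    (l := PySem.List.enumerate qs)
    (a := vids.map (fun _ => ([] : List Int)))
    (b := ([] : List (List Int)))]
  rw [B_v2t_eq, B_matches_eq]
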